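-- pv_equiv track=rewrite | github.com/matheusparreira22/A-Jornada-dos-Elfos-Codificadores- | index.py | rastrear_posicao
-- ===== SOURCE A (Python) =====
-- def rastrear_posicao(movimentos):
--     # Inicializa as coordenadas
--     x, y = 0, 0
--
--     # Itera sobre os movimentos e ajusta as coordenadas
--     for movimento in movimentos:
--         if movimento == "norte":
--             y += 1
--         elif movimento == "sul":
--             y -= 1
--         elif movimento == "leste":
--             x += 1
--         elif movimento == "oeste":
--             x -= 1
--
--     # Retorna a posição final otimizada
--     return x, y
-- ===== SOURCE B (Python) =====
-- def rastrear_posicao(movimentos):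
--     # Aggregate-then-reduce: count each direction once, combine in closed form.
--     return (movimentos.count("leste") - movimentos.count("oeste"),
--             movimentos.count("norte") - movimentos.count("sul"))
-- ===== Notes on version B (the rewrite author's own statement) =====
-- stated objective: simpler
-- what changed: Replaces the per-element if/elif accumulation loop by four list.count tallies combined in a closed form (x = leste-oeste, y = norte-sul).
import Mathlib
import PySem

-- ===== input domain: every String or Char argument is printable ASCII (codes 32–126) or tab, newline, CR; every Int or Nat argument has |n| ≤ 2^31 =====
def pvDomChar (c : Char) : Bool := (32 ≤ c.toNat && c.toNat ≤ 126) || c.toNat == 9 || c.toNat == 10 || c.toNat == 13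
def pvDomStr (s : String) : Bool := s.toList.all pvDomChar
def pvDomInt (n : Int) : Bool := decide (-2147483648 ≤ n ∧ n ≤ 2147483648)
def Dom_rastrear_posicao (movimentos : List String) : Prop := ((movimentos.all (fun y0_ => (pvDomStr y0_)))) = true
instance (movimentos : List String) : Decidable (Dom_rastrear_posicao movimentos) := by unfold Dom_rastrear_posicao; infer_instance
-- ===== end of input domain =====

-- B replaces A's per-element if/elif loop by four list.count tallies combined in closed form (objective: simpler).


-- ===== PORT A =====
def rastrear_posicao (movimentos : List String) : Int × Int :=
  movimentos.foldl
    (fun (p : Int × Int) movimento =>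
      if movimento == "norte" then (p.1, p.2 + 1)
      else if movimento == "sul" then (p.1, p.2 - 1)
      else if movimento == "leste" then (p.1 + 1, p.2)
      else if movimento == "oeste" then (p.1 - 1, p.2)
      else p)
    (0, 0)

-- ===== PORT B =====
def rastrear_posicao_alt (movimentos : List String) : Int × Int :=
  ((PySem.List.count movimentos "leste" : Int) - (PySem.List.count movimentos "oeste" : Int),
   (PySem.List.count movimentos "norte" : Int) - (PySem.List.count movimentos "sul" : Int))

-- ===== PRECONDITION & SPEC =====
def Spec_rastrear_posicao (movimentos : List String) (out : Int × Int) : Prop := out = rastrear_posicao_alt movimentos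
instance (movimentos : List String) (out : Int × Int) : Decidable (Spec_rastrear_posicao movimentos out) := by unfold Spec_rastrear_posicao; infer_instance

-- ===== CLAIM (what is proved, stated in full; the proofs are below) =====
def Claim_equal_rastrear_posicao : Prop := ∀ (movimentos : List String), Dom_rastrear_posicao movimentos → Spec_rastrear_posicao movimentos (rastrear_posicao movimentos)

-- ===== LEMMAS AND PROOFS =====

-- Loop invariant: folding A's step from any start (a, b) adds the four count differences.
theorem rastrear_posicao_foldl (movimentos : List String) (a b : Int) :
    movimentos.foldl
      (fun (p : Int × Int) movimento =>
        if movimento == "norte" then (p.1, p.2 + 1)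
        else if movimento == "sul" then (p.1, p.2 - 1)
        else if movimento == "leste" then (p.1 + 1, p.2)
        else if movimento == "oeste" then (p.1 - 1, p.2)
        else p)
      (a, b)
    = (a + (movimentos.count "leste" : Int) - (movimentos.count "oeste" : Int),
       b + (movimentos.count "norte" : Int) - (movimentos.count "sul" : Int)) := by
  induction movimentos generalizing a b with
  | nil => simp
  | cons m ms ih =>
    simp only [List.foldl_cons]
    split_ifs with h1 h2 h3 h4 <;> rw [ih] <;>
      simp_all [List.count_cons] <;> omega

-- ===== VERDICT (by name: the statement is the Claim_ definition above) =====
theorem rastrear_posicao_spec : Claim_equal_rastrear_posicao := by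
  intro movimentos _
  unfold Spec_rastrear_posicao rastrear_posicao rastrear_posicao_alt PySem.List.count
  rw [rastrear_posicao_foldl]
  simp [List.count]
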